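-- pv_equiv track=rewrite | github.com/Kawser-nerd/CLCDSA | Source Codes/AtCoder/agc009/B/4351154.py | dfs
-- ===== SOURCE A (Python) =====
-- def dfs(v: int, graph: list) -> int:
--     if graph[v] == []:
--         return 0
--
--     else:
--         ret = -1
--         cands = []
--         for ch in graph[v]:
--             cands.append(dfs(ch, graph))
--
--         cands.sort(reverse=True)
--
--         for idx, cand in enumerate(cands):
--             ret = max(ret, idx+1 + cand)
--
--         return ret
-- ===== SOURCE B (Python) =====
-- def dfs(v: int, graph: list) -> int:
--     # Bottom-up value iteration instead of A's memo-less recursive DFS: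
--     # first take the reference-closure of {v} (the only rows that can
--     # influence the answer), then recompute every closure node's value from
--     # the previous round's values; n + 1 rounds suffice, since a node's value
--     # stabilizes once the round count reaches its height (a longest acyclic
--     # chain has at most n nodes).
--     n = len(graph)
--     # the closure only contains v and entries of rows, so it stops growing
--     # after at most 1 + (total number of edge entries) expansion rounds
--     bound = 1 + sum(len(row) for row in graph)
--     reach = {v}
--     for _ in range(bound):
--         reach = reach | {ch for i in reach for ch in graph[i]}
--     res = {i: 0 for i in reach}
--     for _ in range(n + 1):
--         res = {i: max((k + 1 + c
--                        for k, c in enumerate(sorted((res[ch] for ch in graph[i]),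
--                                                     reverse=True))),
--                       default=0)
--                for i in reach}
--     return res[v]
-- ===== Notes on version B (the rewrite author's own statement) =====
-- stated objective: alternative
-- what changed: Replaces A's memo-less top-down recursive DFS with a bottom-up whole-graph value iteration: n+1 rounds each recompute every node's value from the previous round's vector, and res[v] is read off at the end.
import Mathlib
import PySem

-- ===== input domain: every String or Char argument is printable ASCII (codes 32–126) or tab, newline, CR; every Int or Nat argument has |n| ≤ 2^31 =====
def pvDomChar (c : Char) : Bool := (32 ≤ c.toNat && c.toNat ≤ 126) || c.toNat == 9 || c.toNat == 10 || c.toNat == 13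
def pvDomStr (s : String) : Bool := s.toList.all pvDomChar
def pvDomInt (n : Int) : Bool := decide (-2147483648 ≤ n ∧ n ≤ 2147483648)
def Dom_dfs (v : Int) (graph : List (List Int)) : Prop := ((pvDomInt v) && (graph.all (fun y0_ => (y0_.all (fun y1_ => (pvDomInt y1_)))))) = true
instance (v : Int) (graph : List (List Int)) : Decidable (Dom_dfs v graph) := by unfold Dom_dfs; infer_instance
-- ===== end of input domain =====

-- B replaces A's memo-less recursive DFS by a bottom-up value iteration over the
-- reference-closure of {v} (closure first, then n+1 rounds of recomputing every
-- closure node's value); same return value on Pre_, no speed claim.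

-- ===== PORT A =====
-- fuel is only a totality guard: under Pre_ the recursion depth is at most
-- graph.length (acyclic reachable part), so fuel graph.length + 1 is never exhausted.
def dfsA : Nat → Int → List (List Int) → Int
  | 0, _, _ => 0
  | (fuel+1), v, graph =>
    match PySem.List.pyGet? graph v with
    | none => 0  -- Python raises IndexError here; excluded by Pre_
    | some row =>
      if row = [] then 0
      else
        (PySem.List.enumerate
            (PySem.List.sorted (row.map (fun ch => dfsA fuel ch graph)) (fun y => y) true) 0).foldl
          (fun ret p => max ret (p.1 + 1 + p.2)) (-1)

def dfs (v : Int) (graph : List (List Int)) : Int := dfsA (graph.length + 1) v graph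

-- ===== PORT B =====
-- one expansion round: reach = reach | {ch for i in reach for ch in graph[i]}
-- (graph[i] raises in Python when i is out of range; excluded by Pre_, default [])
def pvExpandB (graph : List (List Int)) (s : PySem.Set Int) : PySem.Set Int :=
  PySem.Set.union s (PySem.Set.ofList (s.flatMap (fun i => PySem.List.pyGetD graph i [])))

-- reach after `1 + sum(len(row) for row in graph)` rounds
def pvReachB (v : Int) (graph : List (List Int)) : PySem.Set Int :=
  (List.range (1 + (graph.map List.length).sum)).foldl (fun s _ => pvExpandB graph s)
    (PySem.Set.ofList [v])

-- value of node i in one round: max((k+1+c for k,c in enumerate(sorted((res[ch] for ch in graph[i]), reverse=True))), default=0)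
def pvRowValB (graph : List (List Int)) (res : PySem.Dict Int Int) (i : Int) : Int :=
  PySem.List.maxD
    ((PySem.List.enumerate
        (PySem.List.sorted ((PySem.List.pyGetD graph i []).map
            (fun ch => (PySem.Dict.get? res ch).getD 0)) (fun y => y) true) 0).map
      (fun p => p.1 + 1 + p.2))
    (fun y => y) 0

-- one round of the dict comprehension {i: ... for i in reach}
def pvStepD (graph : List (List Int)) (reach : List Int) (res : PySem.Dict Int Int) :
    PySem.Dict Int Int :=
  reach.foldl (fun d i => d.insert i (pvRowValB graph res i)) PySem.Dict.empty

def dfs_alt (v : Int) (graph : List (List Int)) : Int :=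
  let reach := pvReachB v graph
  let res := (List.range (graph.length + 1)).foldl (fun res _ => pvStepD graph reach res)
    (reach.foldl (fun d i => d.insert i 0) PySem.Dict.empty)
  (PySem.Dict.get? res v).getD 0

-- ===== PRECONDITION & SPEC =====
-- graph reachability helpers for Pre_ (a property of the input graph, not a run of either algorithm)
def pvSuccs (graph : List (List Int)) (i : Nat) : List Nat :=
  (graph.getD i []).filterMap (fun ch =>
    if -(graph.length : Int) ≤ ch ∧ ch < (graph.length : Int)
    then some ((ch % (graph.length : Int)).toNat) else none)

def pvExpand (graph : List (List Int)) (s : List Nat) : List Nat :=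
  (s ++ s.flatMap (pvSuccs graph)).dedup

def pvReach (graph : List (List Int)) (start : List Nat) : List Nat :=
  (List.range graph.length).foldl (fun s _ => pvExpand graph s) start

-- Pre_ excludes exactly the inputs where Python A raises: v out of range (IndexError),
-- an out-of-range edge on a row reachable from v (IndexError), or a cycle reachable
-- from v (the recursion never returns).
def Pre_dfs (v : Int) (graph : List (List Int)) : Prop :=
  (-(graph.length : Int) ≤ v ∧ v < (graph.length : Int)) ∧
  (∀ i ∈ pvReach graph [(v % (graph.length : Int)).toNat],
     (∀ ch ∈ graph.getD i [], -(graph.length : Int) ≤ ch ∧ ch < (graph.length : Int)) ∧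
     i ∉ pvReach graph (pvSuccs graph i))
instance (v : Int) (graph : List (List Int)) : Decidable (Pre_dfs v graph) := by
  unfold Pre_dfs; infer_instance

def pvWitness_dfs : Int × List (List Int) := (0, [[1], []])

def Spec_dfs (v : Int) (graph : List (List Int)) (out : Int) : Prop := out = dfs_alt v graph
instance (v : Int) (graph : List (List Int)) (out : Int) : Decidable (Spec_dfs v graph out) := by unfold Spec_dfs; infer_instance

-- ===== CLAIM (what is proved, stated in full; the proofs are below) =====
def Claim_equal_dfs : Prop := ∀ (v : Int) (graph : List (List Int)), Dom_dfs v graph → Pre_dfs v graph → Spec_dfs v graph (dfs v graph)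

-- ===== LEMMAS AND PROOFS =====

lemma pv_range_foldl {β : Type} (f : β → β) (init : β) (m : Nat) :
    (List.range m).foldl (fun s _ => f s) init = f^[m] init := by
  induction m with
  | zero => rfl
  | succ k ih =>
    rw [List.range_succ, List.foldl_append, Function.iterate_succ_apply']
    simp [ih]

-- closure iteration, round-indexed
def pvS (v : Int) (graph : List (List Int)) (m : Nat) : List Int :=
  (pvExpandB graph)^[m] (PySem.Set.ofList [v])

lemma pvS_succ (v : Int) (graph : List (List Int)) (m : Nat) :
    pvS v graph (m+1) = pvExpandB graph (pvS v graph m) :=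
  Function.iterate_succ_apply' _ _ _

lemma pv_reachB_eq (v : Int) (graph : List (List Int)) :
    pvReachB v graph = pvS v graph (1 + (graph.map List.length).sum) :=
  pv_range_foldl _ _ _

lemma pv_mem_v (v : Int) (graph : List (List Int)) (m : Nat) : v ∈ pvS v graph m := by
  induction m with
  | zero => exact (PySem.Set.mem_ofList _ _).mpr List.mem_cons_self
  | succ k ih =>
    rw [pvS_succ]
    exact (PySem.Set.mem_union _ _ _).mpr (Or.inl ih)

lemma pvS_nodup (v : Int) (graph : List (List Int)) (m : Nat) : (pvS v graph m).Nodup := by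
  induction m with
  | zero => exact PySem.Set.nodup_ofList _
  | succ k ih =>
    rw [pvS_succ]
    exact PySem.Set.nodup_union _ _ ih

lemma pv_mem_rows {graph : List (List Int)} {s : List Int} {x : Int}
    (h : x ∈ PySem.Set.ofList (s.flatMap (fun i => PySem.List.pyGetD graph i []))) :
    x ∈ graph.flatten := by
  rcases List.mem_flatMap.mp ((PySem.Set.mem_ofList _ _).mp h) with ⟨i, _, hx⟩
  rcases hg : PySem.List.pyGet? graph i with _ | row
  · simp [PySem.List.pyGetD, hg] at hx
  · rw [PySem.List.pyGetD, hg, Option.getD_some] at hx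
    exact List.mem_flatten.mpr ⟨row, PySem.List.mem_of_pyGet?_eq_some graph hg, hx⟩

lemma pvS_subset (v : Int) (graph : List (List Int)) (m : Nat) :
    ∀ x ∈ pvS v graph m, x ∈ v :: graph.flatten := by
  induction m with
  | zero =>
    intro x hx
    have hxv : x = v := by simpa using (PySem.Set.mem_ofList _ _).mp hx
    exact hxv ▸ List.mem_cons_self
  | succ k ih =>
    intro x hx
    rw [pvS_succ] at hx
    rcases (PySem.Set.mem_union _ _ _).mp hx with h | h
    · exact ih x h
    · exact List.mem_cons_of_mem _ (pv_mem_rows h)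

lemma pv_foldl_add_prefix (t s : List Int) :
    ∃ ext, t.foldl PySem.Set.add s = s ++ ext := by
  induction t generalizing s with
  | nil => exact ⟨[], by simp⟩
  | cons a t ih =>
    by_cases ha : a ∈ s
    · rw [List.foldl_cons, PySem.Set.add_of_mem ha]; exact ih s
    · rw [List.foldl_cons, PySem.Set.add_of_not_mem ha]
      rcases ih (s ++ [a]) with ⟨ext, he⟩
      exact ⟨[a] ++ ext, by rw [he, List.append_assoc]⟩

lemma pv_expand_eq (graph : List (List Int)) (s : PySem.Set Int) :
    pvExpandB graph s
      = List.foldl PySem.Set.add s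
          (PySem.Set.ofList (s.flatMap (fun i => PySem.List.pyGetD graph i []))) := rfl

lemma pv_stab (v : Int) (graph : List (List Int)) (m : Nat) :
    pvExpandB graph (pvS v graph m) = pvS v graph m ∨ m + 1 ≤ (pvS v graph m).length := by
  induction m with
  | zero =>
    right
    simp [pvS, PySem.Set.ofList, PySem.Set.add, PySem.Set.empty]
  | succ k ih =>
    by_cases hst : pvExpandB graph (pvS v graph k) = pvS v graph k
    · left; rw [pvS_succ, hst, hst]
    · rcases ih with h | h
      · exact absurd h hst
      · right
        rcases pv_foldl_add_prefix
            (PySem.Set.ofList ((pvS v graph k).flatMap (fun i => PySem.List.pyGetD graph i [])))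
            (pvS v graph k) with ⟨ext, he⟩
        have hex : pvExpandB graph (pvS v graph k) = pvS v graph k ++ ext := by
          rw [pv_expand_eq]; exact he
        rcases ext with _ | ⟨e, ext⟩
        · exact absurd (by simpa using hex) hst
        · rw [pvS_succ]
          have hlen := congrArg List.length hex
          simp only [List.length_append, List.length_cons] at hlen
          omega

lemma pv_closed (v : Int) (graph : List (List Int)) :
    ∀ i ∈ pvReachB v graph, ∀ ch ∈ PySem.List.pyGetD graph i [], ch ∈ pvReachB v graph := by
  intro i hi ch hch
  rw [pv_reachB_eq] at hi ⊢
  have hstable : pvExpandB graph (pvS v graph (1 + (graph.map List.length).sum))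
      = pvS v graph (1 + (graph.map List.length).sum) := by
    rcases pv_stab v graph (1 + (graph.map List.length).sum) with h | h
    · exact h
    · have hle := ((pvS_nodup v graph (1 + (graph.map List.length).sum)).subperm
        (fun x hx => pvS_subset v graph (1 + (graph.map List.length).sum) x hx)).length_le
      simp only [List.length_cons, List.length_flatten] at hle
      omega
  have hmem : ch ∈ pvExpandB graph (pvS v graph (1 + (graph.map List.length).sum)) :=
    (PySem.Set.mem_union _ _ _).mpr
      (Or.inr ((PySem.Set.mem_ofList _ _).mpr (List.mem_flatMap.mpr ⟨i, hi, hch⟩)))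
  rwa [hstable] at hmem

-- dict built by a fold of inserts over distinct keys
lemma pv_dict_untouched (t : List Int) (f : Int → Int) (d : PySem.Dict Int Int) (i : Int)
    (hi : i ∉ t) :
    (t.foldl (fun d j => d.insert j (f j)) d).get? i = d.get? i := by
  induction t generalizing d with
  | nil => rfl
  | cons a t ih =>
    rw [List.foldl_cons, ih _ (fun h => hi (List.mem_cons_of_mem _ h)),
      PySem.Dict.get?_insert]
    rw [if_neg (fun h => hi (by rw [h]; exact List.mem_cons_self))]

lemma pv_dict_build (t : List Int) (f : Int → Int) (i : Int) (hi : i ∈ t) (hn : t.Nodup)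
    (d : PySem.Dict Int Int) :
    (t.foldl (fun d j => d.insert j (f j)) d).get? i = some (f i) := by
  induction t generalizing d with
  | nil => cases hi
  | cons a t ih =>
    rcases List.mem_cons.mp hi with rfl | hmem
    · rw [List.foldl_cons, pv_dict_untouched _ _ _ _ (List.nodup_cons.mp hn).1,
        PySem.Dict.get?_insert_self]
    · exact ih hmem (List.nodup_cons.mp hn).2 _

lemma pv_vals_ge_one (cands : List Int) (h : ∀ c ∈ cands, 0 ≤ c) :
    ∀ y ∈ (PySem.List.enumerate (PySem.List.sorted cands (fun y => y) true) 0).map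
        (fun p => p.1 + 1 + p.2), 1 ≤ y := by
  intro y hy
  rcases List.mem_map.mp hy with ⟨p, hp, rfl⟩
  rcases (PySem.List.mem_enumerate_iff _ _ _).mp hp with ⟨k, hk, rfl⟩
  have hmem : (PySem.List.sorted cands (fun y => y) true)[k]
      ∈ PySem.List.sorted cands (fun y => y) true := List.getElem_mem hk
  have h0 : 0 ≤ (PySem.List.sorted cands (fun y => y) true)[k] :=
    h _ ((PySem.List.mem_sorted _ _ _ _).mp hmem)
  have hk0 : (0:Int) ≤ (k : Int) := Int.natCast_nonneg k
  simp only []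
  omega

lemma pv_fold_eq_maxD (vals : List Int) (hne : vals ≠ []) (h1 : ∀ y ∈ vals, (1:Int) ≤ y) :
    vals.foldl max (-1) = PySem.List.maxD vals (fun y => y) 0 := by
  rcases vals with _ | ⟨x, t⟩
  · exact absurd rfl hne
  · have hx : max (-1 : Int) x = x := by
      have := h1 x List.mem_cons_self; omega
    rw [PySem.List.maxD, PySem.List.max?_id_cons, Option.getD_some, List.foldl_cons, hx]

lemma pv_dfsA_nonneg (k : Nat) : ∀ (i : Int) (graph : List (List Int)), 0 ≤ dfsA k i graph := by
  induction k with
  | zero => intro i graph; simp [dfsA]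
  | succ k ih =>
    intro i graph
    rcases hg : PySem.List.pyGet? graph i with _ | row
    · simp [dfsA, hg]
    · by_cases hrnil : row = []
      · simp [dfsA, hg, hrnil]
      · have hA : dfsA (k+1) i graph
            = ((PySem.List.enumerate
                (PySem.List.sorted (row.map (fun ch => dfsA k ch graph)) (fun y => y) true) 0).map
                (fun p => p.1 + 1 + p.2)).foldl max (-1) := by
          simp only [dfsA, hg, if_neg hrnil]
          rw [List.foldl_map]
        rw [hA]
        rcases hv : (PySem.List.enumerate
            (PySem.List.sorted (row.map (fun ch => dfsA k ch graph)) (fun y => y) true) 0).map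
            (fun p => p.1 + 1 + p.2) with _ | ⟨x, t⟩
        · exfalso
          have := congrArg List.length hv
          simp [PySem.List.length_enumerate, PySem.List.length_sorted] at this
          exact hrnil this
        · have hx : 1 ≤ x := by
            refine pv_vals_ge_one (row.map (fun ch => dfsA k ch graph)) ?_ x (hv ▸ List.mem_cons_self)
            intro c hc
            rcases List.mem_map.mp hc with ⟨ch, _, rfl⟩
            exact ih ch graph
          rw [hv, List.foldl_cons]
          have hmx : max (-1 : Int) x = x := by omega
          rw [hmx]
          have := (PySem.List.le_foldl_max t x).1
          omega

-- the value-iteration rounds, round-indexed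
def pvD (graph : List (List Int)) (reach : List Int) (k : Nat) : PySem.Dict Int Int :=
  (pvStepD graph reach)^[k] (reach.foldl (fun d i => d.insert i 0) PySem.Dict.empty)

lemma pv_round (v : Int) (graph : List (List Int)) (k : Nat) :
    ∀ i ∈ pvReachB v graph,
      (pvD graph (pvReachB v graph) k).get? i = some (dfsA k i graph) := by
  have hnd : (pvReachB v graph).Nodup := by
    rw [pv_reachB_eq]; exact pvS_nodup v graph _
  induction k with
  | zero =>
    intro i hi
    exact pv_dict_build _ (fun _ => 0) i hi hnd _
  | succ k ih =>
    intro i hi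
    rw [show pvD graph (pvReachB v graph) (k+1)
        = pvStepD graph (pvReachB v graph) (pvD graph (pvReachB v graph) k)
        from Function.iterate_succ_apply' _ _ _, pvStepD,
      pv_dict_build _ _ i hi hnd]
    congr 1
    rcases hg : PySem.List.pyGet? graph i with _ | row
    · have hrow : PySem.List.pyGetD graph i [] = [] := by simp [PySem.List.pyGetD, hg]
      simp [pvRowValB, hrow, dfsA, hg]
      rfl
    · have hrow : PySem.List.pyGetD graph i [] = row := by simp [PySem.List.pyGetD, hg]
      have hmc : row.map (fun ch => (PySem.Dict.get? (pvD graph (pvReachB v graph) k) ch).getD 0)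
          = row.map (fun ch => dfsA k ch graph) := by
        refine List.map_congr_left (fun ch hch => ?_)
        have hchr : ch ∈ pvReachB v graph := pv_closed v graph i hi ch (hrow ▸ hch)
        rw [ih ch hchr, Option.getD_some]
      by_cases hrnil : row = []
      · subst hrnil
        simp [pvRowValB, hrow, dfsA, hg]
        rfl
      · have hB : pvRowValB graph (pvD graph (pvReachB v graph) k) i
            = PySem.List.maxD
              ((PySem.List.enumerate
                (PySem.List.sorted (row.map (fun ch => dfsA k ch graph)) (fun y => y) true) 0).map
                (fun p => p.1 + 1 + p.2)) (fun y => y) 0 := by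
          rw [pvRowValB, hrow, hmc]
        have hA : dfsA (k+1) i graph
            = ((PySem.List.enumerate
                (PySem.List.sorted (row.map (fun ch => dfsA k ch graph)) (fun y => y) true) 0).map
                (fun p => p.1 + 1 + p.2)).foldl max (-1) := by
          simp only [dfsA, hg, if_neg hrnil]
          rw [List.foldl_map]
        rw [hA, hB]
        have hvne : ((PySem.List.enumerate
            (PySem.List.sorted (row.map (fun ch => dfsA k ch graph)) (fun y => y) true) 0).map
            (fun p => p.1 + 1 + p.2)) ≠ [] := by
          simp only [ne_eq, List.map_eq_nil_iff]
          intro hnil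
          have := congrArg List.length hnil
          simp [PySem.List.length_enumerate, PySem.List.length_sorted] at this
          exact hrnil this
        refine (pv_fold_eq_maxD _ hvne (pv_vals_ge_one _ ?_)).symm
        intro c hc
        rcases List.mem_map.mp hc with ⟨ch, _, rfl⟩
        exact pv_dfsA_nonneg k ch graph

-- ===== VERDICT (by name: the statement is the Claim_ definition above) =====
theorem dfs_spec : Claim_equal_dfs := by
  intro v graph _hdom _hpre
  unfold Spec_dfs dfs dfs_alt
  show dfsA (graph.length + 1) v graph
      = (((List.range (graph.length + 1)).foldl
            (fun res _ => pvStepD graph (pvReachB v graph) res)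
            (List.foldl (fun d i => d.insert i 0) PySem.Dict.empty (pvReachB v graph))).get?
          v).getD 0
  rw [pv_range_foldl (pvStepD graph (pvReachB v graph))]
  have hv : v ∈ pvReachB v graph := by
    rw [pv_reachB_eq]; exact pv_mem_v v graph _
  rw [show (pvStepD graph (pvReachB v graph))^[graph.length + 1]
      (List.foldl (fun d i => d.insert i 0) PySem.Dict.empty (pvReachB v graph))
      = pvD graph (pvReachB v graph) (graph.length + 1) from rfl]
  rw [pv_round v graph (graph.length + 1) v hv, Option.getD_some]
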